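-- pv_equiv track=rewrite | github.com/daniiomir/word_frequency | main.py | str_norm
-- ===== SOURCE A (Python) =====
-- def str_norm(line):
--     symbols = ['.' , ',', ':', ';', '!', '?',
--                 '(', ')', '%', '[', ']', '{',
--                 '}', '\t', '@', '#', '&', '\\',
--                 '/', '<', '>', '+', '=', '-', '–',
--                 '_', '\'', '\"', '…', '«', '»']
--     for i in symbols:
--         line = line.replace(i, ' ')
--     return line.lower()
-- ===== SOURCE B (Python) =====
-- def str_norm(line):
--     symbols = {'.', ',', ':', ';', '!', '?',
--                '(', ')', '%', '[', ']', '{',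
--                '}', '\t', '@', '#', '&', '\\',
--                '/', '<', '>', '+', '=', '-', '\u2013',
--                '_', '\'', '"', '\u2026', '\u00ab', '\u00bb'}
--     return ''.join(' ' if c in symbols else c for c in line).lower()
-- ===== Notes on version B (the rewrite author's own statement) =====
-- stated objective: alternative
-- what changed: B makes a single pass over the characters of the line, mapping each symbol to a space via one set-membership test, instead of A's 31 successive whole-string str.replace passes.
import Mathlib
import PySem

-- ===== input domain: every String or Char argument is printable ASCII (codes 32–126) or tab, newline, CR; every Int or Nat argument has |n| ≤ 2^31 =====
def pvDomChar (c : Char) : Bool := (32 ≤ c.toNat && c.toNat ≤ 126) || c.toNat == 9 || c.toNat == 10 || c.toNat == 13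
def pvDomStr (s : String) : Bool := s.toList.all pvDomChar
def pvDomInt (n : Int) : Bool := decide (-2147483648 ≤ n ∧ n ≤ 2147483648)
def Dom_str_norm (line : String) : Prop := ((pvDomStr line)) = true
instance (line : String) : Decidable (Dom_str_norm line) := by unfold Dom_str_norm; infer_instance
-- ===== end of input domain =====

-- B makes one character-level pass with a set membership instead of A's 31 whole-string replace passes (objective: alternative).

-- ===== PORT A =====
-- A replaces each of its 31 symbol strings with ' ' in turn, then lowercases.
def str_norm (line : String) : String :=
  let symbols : List String := [".", ",", ":", ";", "!", "?",
    "(", ")", "%", "[", "]", "{",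
    "}", "\t", "@", "#", "&", "\\",
    "/", "<", ">", "+", "=", "-", "–",
    "_", "'", "\"", "…", "«", "»"]
  PySem.Str.lower (symbols.foldl (fun l i => PySem.Str.replace l i " ") line)

-- ===== PORT B =====
-- B: single pass over the characters, ' ' for symbols, then lowercase.
def str_norm_alt (line : String) : String :=
  let symbols : PySem.Set Char := PySem.Set.ofList ['.', ',', ':', ';', '!', '?',
    '(', ')', '%', '[', ']', '{',
    '}', '\t', '@', '#', '&', '\\',
    '/', '<', '>', '+', '=', '-', '–',
    '_', '\'', '"', '…', '«', '»']
  PySem.Str.lower (String.ofList (line.toList.map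
    (fun c => if PySem.Set.contains symbols c then ' ' else c)))

-- ===== PRECONDITION & SPEC =====
def Spec_str_norm (line : String) (out : String) : Prop := out = str_norm_alt line
instance (line : String) (out : String) : Decidable (Spec_str_norm line out) := by unfold Spec_str_norm; infer_instance

-- ===== CLAIM (what is proved, stated in full; the proofs are below) =====
def Claim_equal_str_norm : Prop := ∀ (line : String), Dom_str_norm line → Spec_str_norm line (str_norm line)

-- ===== LEMMAS AND PROOFS =====

-- the 31 symbols, as characters
def pvSyms : List Char := ['.', ',', ':', ';', '!', '?',
    '(', ')', '%', '[', ']', '{',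
    '}', '\t', '@', '#', '&', '\\',
    '/', '<', '>', '+', '=', '-', '–',
    '_', '\'', '"', '…', '«', '»']

lemma go_single (c : Char) : ∀ (l : List Char) (fuel : Nat) (acc : List Char),
    l.length ≤ fuel →
    PySem.Chars.replace.go [c] [' '] fuel l acc
      = acc.reverse ++ l.map (fun x => if x = c then ' ' else x) := by
  intro l
  induction l with
  | nil =>
    intro fuel acc _
    cases fuel <;> simp [PySem.Chars.replace.go]
  | cons c' t ih =>
    intro fuel acc h
    cases fuel with
    | zero => simp at h
    | succ n =>
      have hn : t.length ≤ n := by simpa using h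
      by_cases hc : c = c'
      · subst hc
        simp [PySem.Chars.replace.go, List.isPrefixOf, ih _ _ hn]
      · simp [PySem.Chars.replace.go, List.isPrefixOf, hc, Ne.symm hc, ih _ _ hn]

lemma replace_single (s : List Char) (c : Char) :
    PySem.Chars.replace s [c] [' '] = s.map (fun x => if x = c then ' ' else x) := by
  simpa [PySem.Chars.replace] using go_single c s s.length [] le_rfl

lemma chain (ss : List Char) : ∀ (s : List Char),
    ss.foldl (fun l c => PySem.Chars.replace l [c] [' ']) s
      = s.map (fun x => if x ∈ ss then ' ' else x) := by
  induction ss with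
  | nil => intro s; simp
  | cons y ys ih =>
    intro s
    rw [List.foldl_cons, replace_single, ih, List.map_map]
    refine List.map_congr_left (fun x _ => ?_)
    by_cases hx : x = y
    · simp [hx, Function.comp]
    · simp [Function.comp, hx]

lemma foldlA (cs : List Char) : ∀ (s : String),
    ((cs.map (fun c => String.ofList [c])).foldl (fun t i => PySem.Str.replace t i " ") s).toList
      = cs.foldl (fun l c => PySem.Chars.replace l [c] [' ']) s.toList := by
  induction cs with
  | nil => intro s; simp
  | cons c cs ih =>
    intro s
    simp only [List.map_cons, List.foldl_cons, ih, PySem.Str.toList_replace,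
      String.toList_ofList]
    rfl

lemma memContains (x : Char) :
    PySem.Set.contains (PySem.Set.ofList pvSyms) x = true ↔ x ∈ pvSyms := by
  simp [PySem.Set.contains, PySem.Set.mem_ofList]

-- ===== VERDICT (by name: the statement is the Claim_ definition above) =====
set_option maxRecDepth 4096 in
set_option maxHeartbeats 1000000 in
theorem str_norm_spec : Claim_equal_str_norm := by
  intro line _
  show str_norm line = str_norm_alt line
  unfold str_norm str_norm_alt
  simp only [PySem.Str.lower]
  refine congrArg String.ofList ?_
  refine congrArg PySem.Chars.lower ?_
  have hsym : ([".", ",", ":", ";", "!", "?",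
      "(", ")", "%", "[", "]", "{",
      "}", "\t", "@", "#", "&", "\\",
      "/", "<", ">", "+", "=", "-", "–",
      "_", "'", "\"", "…", "«", "»"] : List String)
      = pvSyms.map (fun c => String.ofList [c]) := rfl
  rw [hsym, foldlA, chain pvSyms, String.toList_ofList,
    show (['.', ',', ':', ';', '!', '?', '(', ')', '%', '[', ']', '{',
      '}', '\t', '@', '#', '&', '\\', '/', '<', '>', '+', '=', '-', '–',
      '_', '\'', '"', '…', '«', '»'] : List Char) = pvSyms from rfl]
  refine List.map_congr_left (fun x _ => ?_)
  by_cases hx : x ∈ pvSyms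
  · rw [if_pos hx, if_pos ((memContains x).mpr hx)]
  · rw [if_neg hx, if_neg (fun h => hx ((memContains x).mp h))]
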